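-- pv_equiv track=rewrite | github.com/T-rav/hyrdaflow | scripts/hydraflow_init/prompt.py | _remediations
-- ===== SOURCE A (Python) =====
-- from collections import Counter
--
-- def _remediations(actionable: list[dict]) -> list[str]:
--     if not actionable:
--         return ["## Remediations", "", "No actionable findings — audit is green.", ""]
--
--     lines = ["## Remediations by principle", ""]
--     by_principle: dict[str, list[dict]] = {}
--     for f in actionable:
--         by_principle.setdefault(f.get("principle", "?"), []).append(f)
--
--     for principle in sorted(by_principle, key=_principle_sort_key):
--         bucket = by_principle[principle]
--         counts = Counter(f.get("status") for f in bucket)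
--         headline = ", ".join(
--             f"{status} {count}" for status, count in counts.most_common()
--         )
--         lines.append(f"### {principle} — {headline}")
--         lines.append("")
--         for finding in bucket:
--             lines.extend(_format_finding(finding))
--         lines.append("")
--     return lines
--
-- def _format_finding(f: dict) -> list[str]:
--     check_id = f.get("check_id", "?")
--     status = f.get("status", "?")
--     what = f.get("what", "")
--     message = f.get("message", "")
--     source = f.get("source", "")
--     remediation = f.get("remediation", "")
--     severity = f.get("severity", "")
--
--     lines = [
--         f"- **{check_id} ({status}, {severity})** — {what}",
--     ]
--     if message:
--         lines.append(f"  - Detail: {message}")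
--     lines.append(f"  - Source: {source}")
--     lines.append(f"  - Fix: {remediation}")
--     return lines
--
-- def _principle_sort_key(principle: str) -> tuple[int, str]:
--     try:
--         return (int(principle.lstrip("P")), principle)
--     except ValueError:
--         return (9999, principle)
-- ===== SOURCE B (Python) =====
-- def _remediations(actionable: list[dict]) -> list[str]:
--     if not actionable:
--         return ["## Remediations", "", "No actionable findings — audit is green.", ""]
--     order = sorted(dict.fromkeys(f.get("principle", "?") for f in actionable),
--                    key=_principle_sort_key)
--     return ["## Remediations by principle", ""] + [
--         line
--         for p in order
--         for line in _section(p, [f for f in actionable if f.get("principle", "?") == p])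
--     ]
--
--
-- def _section(principle: str, bucket: list[dict]) -> list[str]:
--     statuses = [f.get("status") for f in bucket]
--     pairs = sorted(((s, statuses.count(s)) for s in dict.fromkeys(statuses)),
--                    key=lambda sc: -sc[1])
--     headline = ", ".join(f"{s} {c}" for s, c in pairs)
--     return ([f"### {principle} — {headline}", ""]
--             + [line for f in bucket for line in _finding_lines(f)]
--             + [""])
--
--
-- def _finding_lines(f: dict) -> list[str]:
--     msg = f.get("message", "")
--     return (
--         [f"- **{f.get('check_id', '?')} ({f.get('status', '?')}, {f.get('severity', '')})** — {f.get('what', '')}"]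
--         + ([f"  - Detail: {msg}"] if msg else [])
--         + [f"  - Source: {f.get('source', '')}", f"  - Fix: {f.get('remediation', '')}"]
--     )
--
--
-- def _principle_sort_key(principle: str) -> tuple[int, str]:
--     try:
--         return (int(principle.lstrip("P")), principle)
--     except ValueError:
--         return (9999, principle)
-- ===== Notes on version B (the rewrite author's own statement) =====
-- stated objective: alternative
-- what changed: B drops A's dict-of-buckets and its mutating folds: it sorts the deduplicated principles, rebuilds each bucket with a filter over the input, replaces Counter(...).most_common() by dedup+count sorted by negated count, and assembles the report as concatenated comprehensions instead of appending to a shared lines list.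
import Mathlib
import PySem

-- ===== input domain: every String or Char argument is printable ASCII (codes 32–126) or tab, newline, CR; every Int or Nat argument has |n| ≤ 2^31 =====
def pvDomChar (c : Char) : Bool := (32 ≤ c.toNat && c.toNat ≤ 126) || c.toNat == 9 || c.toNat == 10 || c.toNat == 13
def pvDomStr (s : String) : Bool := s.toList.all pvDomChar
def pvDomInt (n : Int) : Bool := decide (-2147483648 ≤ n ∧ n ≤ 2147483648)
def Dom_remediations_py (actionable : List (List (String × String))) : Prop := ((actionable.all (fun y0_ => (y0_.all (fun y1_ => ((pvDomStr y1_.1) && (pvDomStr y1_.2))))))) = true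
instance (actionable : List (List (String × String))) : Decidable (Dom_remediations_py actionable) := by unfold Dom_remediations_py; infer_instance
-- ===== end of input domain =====

-- B replaces A's dict-of-buckets, Counter.most_common and mutating line-list folds by:
-- sorted dedup of principles, filter-built buckets, dedup+count sorted by negated count,
-- and concatenated per-section comprehensions (objective: alternative decomposition).

-- ===== shared module helper (_principle_sort_key, called by both Python versions) =====

-- _principle_sort_key: p.lstrip("P") ported by hand as dropWhile (== 'P') (exact: Python's
-- lstrip("P") removes exactly the leading 'P' characters); int(...) via PySem.Int.ofStr?.
def pvRank (p : String) : Int :=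
  match PySem.Int.ofStr? (String.ofList (p.toList.dropWhile (fun c => c == 'P'))) with
  | some n => n
  | none => 9999

-- the tuple key (int(...-ish), principle); Int ×ₗ String is Python's tuple (lexicographic) order
def pvKey (p : String) : Int ×ₗ String := toLex (pvRank p, p)

-- ===== PORT A =====

-- f.get(k, dflt) on a Python dict (association list, first match)
def pvGet (f : List (String × String)) (k d : String) : String :=
  (PySem.Dict.mk f).getD k d

-- f.get(k) with no default: Option-valued
def pvGetOpt (f : List (String × String)) (k : String) : Option String :=
  (PySem.Dict.mk f).get? k

def pvPr (f : List (String × String)) : String := pvGet f "principle" "?"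

-- f-string rendering of a status that may be None
def pvShowStatus : Option String → String
  | some s => s
  | none => "None"

-- Counter(statuses).most_common() headline: CPython's most_common is
-- sorted(items, key=itemgetter(1), reverse=True) (stable)
def pvHeadline (bucket : List (List (String × String))) : String :=
  PySem.Str.join ", "
    ((PySem.List.sorted (PySem.Dict.counter (bucket.map (fun f => pvGetOpt f "status"))).items
        (fun kv => kv.2) true).map
      (fun kv => pvShowStatus kv.1 ++ " " ++ PySem.Int.toStr kv.2))

-- _format_finding, literal
def pvFmtFinding (f : List (String × String)) : List String :=
  let check_id := pvGet f "check_id" "?"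
  let status := pvGet f "status" "?"
  let what := pvGet f "what" ""
  let message := pvGet f "message" ""
  let source := pvGet f "source" ""
  let remediation := pvGet f "remediation" ""
  let severity := pvGet f "severity" ""
  (["- **" ++ check_id ++ " (" ++ status ++ ", " ++ severity ++ ")** — " ++ what]
    ++ (if message = "" then [] else ["  - Detail: " ++ message]))
    ++ ["  - Source: " ++ source, "  - Fix: " ++ remediation]

-- the body of A's outer for loop: header, blank, extend per finding, trailing blank
def pvSection (lines : List String) (p : String) (bucket : List (List (String × String))) :
    List String :=
  (bucket.foldl (fun ls f => ls ++ pvFmtFinding f)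
    (lines ++ ["### " ++ p ++ " — " ++ pvHeadline bucket, ""])) ++ [""]

def remediations_py (actionable : List (List (String × String))) : List String :=
  if actionable = [] then
    ["## Remediations", "", "No actionable findings — audit is green.", ""]
  else
    (PySem.List.sorted
        (actionable.foldl
          (fun d f => PySem.Dict.modify d (pvPr f) [] (fun b => b ++ [f]))
          (PySem.Dict.mk [])).keys pvKey).foldl
      (fun lines p =>
        pvSection lines p
          ((actionable.foldl
              (fun d f => PySem.Dict.modify d (pvPr f) [] (fun b => b ++ [f]))
              (PySem.Dict.mk [])).getD p []))
      ["## Remediations by principle", ""]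

-- ===== PORT B =====

-- B's own first-match lookup for f.get(k, d) / f.get(k)
def bGet (f : List (String × String)) (k d : String) : String :=
  match f.find? (fun kv => kv.1 == k) with
  | some kv => kv.2
  | none => d

def bGetOpt (f : List (String × String)) (k : String) : Option String :=
  (f.find? (fun kv => kv.1 == k)).map (fun kv => kv.2)

-- _finding_lines: one expression, conditional Detail segment in the middle
def bFinding (f : List (String × String)) : List String :=
  let msg := bGet f "message" ""
  ["- **" ++ bGet f "check_id" "?" ++ " (" ++ bGet f "status" "?" ++ ", "
      ++ bGet f "severity" "" ++ ")** — " ++ bGet f "what" ""]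
    ++ (if msg ≠ "" then ["  - Detail: " ++ msg] else [])
    ++ ["  - Source: " ++ bGet f "source" "", "  - Fix: " ++ bGet f "remediation" ""]

-- _section: status multiplicities via ordered dedup + count, stable-sorted by NEGATED count
def bSection (p : String) (bucket : List (List (String × String))) : List String :=
  let statuses := bucket.map (fun f => bGetOpt f "status")
  let pairs := PySem.List.sorted
      ((PySem.List.dedup statuses).map (fun s => (s, (statuses.count s : Int))))
      (fun sc => -sc.2) false
  ("### " ++ p ++ " — "
      ++ PySem.Str.join ", "
        (pairs.map (fun sc =>
          (match sc.1 with | some t => t | none => "None") ++ " " ++ PySem.Int.toStr sc.2)))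
    :: "" :: (bucket.flatMap bFinding ++ [""])

def remediations_py_alt (actionable : List (List (String × String))) : List String :=
  if actionable = [] then
    ["## Remediations", "", "No actionable findings — audit is green.", ""]
  else
    "## Remediations by principle" :: "" ::
      (PySem.List.sorted
          (PySem.List.dedup (actionable.map (fun f => bGet f "principle" "?"))) pvKey).flatMap
        (fun p => bSection p (actionable.filter (fun f => bGet f "principle" "?" == p)))

-- ===== PRECONDITION & SPEC =====
def Spec_remediations_py (actionable : List (List (String × String))) (out : List String) : Prop := out = remediations_py_alt actionable
instance (actionable : List (List (String × String))) (out : List String) : Decidable (Spec_remediations_py actionable out) := by unfold Spec_remediations_py; infer_instance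

-- ===== CLAIM =====
def Claim_equal_remediations_py : Prop := ∀ (actionable : List (List (String × String))), Dom_remediations_py actionable → Spec_remediations_py actionable (remediations_py actionable)

-- ===== LEMMAS AND PROOFS =====

-- B's find?-based lookups compute A's Dict lookups
theorem pvGetOpt_eq (f : List (String × String)) (k : String) :
    pvGetOpt f k = bGetOpt f k := rfl

theorem pvGet_eq (f : List (String × String)) (k d : String) :
    pvGet f k d = bGet f k d := by
  simp only [pvGet, bGet, PySem.Dict.getD, PySem.Dict.get?]
  cases h : f.find? (fun kv => kv.1 == k)
  · simp
  · simp

-- Python's sorted(…, reverse=True) IS the stable sort by the negated Int key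
theorem sorted_rev_eq_neg {α : Type} (xs : List α) (key : α → Int) :
    PySem.List.sorted xs key true = PySem.List.sorted xs (fun x => -key x) false := by
  rw [PySem.List.sorted_rev_eq_foldl_insertBy, PySem.List.sorted_eq_foldl_insertBy]
  simp

-- the two _format_finding decompositions agree
theorem fmt_eq (f : List (String × String)) : pvFmtFinding f = bFinding f := by
  simp only [pvFmtFinding, bFinding, pvGet_eq]
  by_cases h : bGet f "message" "" = "" <;> simp [h]

-- A's loop body appends exactly B's section
theorem section_eq (lines : List String) (p : String)
    (bucket : List (List (String × String))) :
    pvSection lines p bucket = lines ++ bSection p bucket := by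
  simp only [pvSection, bSection, pvHeadline, PySem.List.foldl_append_eq_flatMap,
    PySem.Dict.items_counter, sorted_rev_eq_neg, pvGetOpt_eq, pvShowStatus,
    PySem.List.dedup_eq_ofList, fmt_eq]
  simp

-- keys of a setdefault/append step: unchanged if the key is present, else appended
theorem keys_modify {nu : Type} (d : PySem.Dict String nu) (k : String) (dflt : nu)
    (fn : nu → nu) :
    (PySem.Dict.modify d k dflt fn).keys =
      if k ∈ d.keys then d.keys else d.keys ++ [k] := by
  have hc : (PySem.Dict.contains d k = true) ↔ k ∈ d.keys := by
    simp [PySem.Dict.contains, PySem.Dict.keys, List.any_eq_true, beq_iff_eq, List.mem_map]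
  simp only [PySem.Dict.modify, PySem.Dict.insert]
  by_cases hm : k ∈ d.keys
  · rw [if_pos (hc.mpr hm), if_pos hm]
    simp only [PySem.Dict.keys, List.map_map]
    refine List.map_congr_left (fun pr _ => ?_)
    by_cases hpk : (pr.1 == k) = true
    · simp [Function.comp, (beq_iff_eq.mp hpk).symm]
    · simp [Function.comp, hpk]
  · rw [if_neg (fun hcc => hm (hc.mp hcc)), if_neg hm]
    simp [PySem.Dict.keys]

-- bucket lookup after a setdefault/append step
theorem getD_modify {nu : Type} (d : PySem.Dict String nu) (k p : String) (dflt d0 : nu)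
    (fn : nu → nu) :
    (PySem.Dict.modify d k dflt fn).getD p d0 =
      if p = k then fn (d.getD k dflt) else d.getD p d0 := by
  simp only [PySem.Dict.modify]
  rw [PySem.Dict.getD_insert]

-- ordered dedup of an extended list
theorem dedup_append_singleton (l : List String) (x : String) :
    PySem.List.dedup (l ++ [x]) =
      if x ∈ PySem.List.dedup l then PySem.List.dedup l else PySem.List.dedup l ++ [x] := by
  have hc : (PySem.Set.contains (PySem.Set.ofList l) x = true) ↔ x ∈ PySem.List.dedup l := by
    simp [PySem.Set.contains, PySem.List.dedup]
  simp only [PySem.Set.ofList] at hc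
  simp only [PySem.List.dedup, PySem.Set.ofList, List.foldl_append, List.foldl_cons,
    List.foldl_nil, PySem.Set.add]
  by_cases hm : x ∈ PySem.List.dedup l
  · rw [if_pos (hc.mpr hm), if_pos (by simpa [PySem.List.dedup, PySem.Set.ofList] using hm)]
  · rw [if_neg (fun hcc => hm (hc.mp hcc)),
      if_neg (by simpa [PySem.List.dedup, PySem.Set.ofList] using hm)]

-- the dict A builds: its keys are the principles, deduplicated in first-occurrence order
theorem dict_keys (xs : List (List (String × String))) :
    (xs.foldl (fun d f => PySem.Dict.modify d (pvPr f) [] (fun b => b ++ [f]))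
      (PySem.Dict.mk [])).keys = PySem.List.dedup (xs.map pvPr) := by
  induction xs using List.reverseRecOn with
  | nil => rfl
  | append_singleton ys f ih =>
      rw [List.foldl_append, List.foldl_cons, List.foldl_nil, List.map_append,
        keys_modify, ih, show List.map pvPr [f] = [pvPr f] from rfl, dedup_append_singleton]

-- the dict A builds: each bucket is the filter of the input by that principle
theorem dict_getD (xs : List (List (String × String))) (p : String) :
    (xs.foldl (fun d f => PySem.Dict.modify d (pvPr f) [] (fun b => b ++ [f]))
      (PySem.Dict.mk [])).getD p [] = xs.filter (fun f => pvPr f == p) := by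
  induction xs using List.reverseRecOn with
  | nil => rfl
  | append_singleton ys f ih =>
      rw [List.foldl_append, List.foldl_cons, List.foldl_nil, List.filter_append,
        getD_modify]
      by_cases hp : p = pvPr f
      · subst hp
        simp [ih]
      · have : (pvPr f == p) = false := by simpa using fun e => hp e.symm
        simp [hp, ih, this]

-- ===== VERDICT (by name: the statement is the Claim_ definition above) =====
theorem remediations_py_spec : Claim_equal_remediations_py := by
  intro actionable _
  unfold Spec_remediations_py remediations_py remediations_py_alt
  by_cases h : actionable = []
  · simp [h]
  · simp only [if_neg h]
    rw [dict_keys]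
    have hstep :
        (fun (lines : List String) (p : String) =>
            pvSection lines p
              ((actionable.foldl
                  (fun d f => PySem.Dict.modify d (pvPr f) [] (fun b => b ++ [f]))
                  (PySem.Dict.mk [])).getD p [])) =
        (fun (lines : List String) (p : String) =>
            lines ++ bSection p (actionable.filter (fun f => bGet f "principle" "?" == p))) := by
      funext lines p
      rw [dict_getD, section_eq]
      simp only [pvPr, pvGet_eq]
    rw [hstep, PySem.List.foldl_append_eq_flatMap]
    have hpr : pvPr = (fun f => bGet f "principle" "?") :=
      funext (fun f => pvGet_eq f "principle" "?")
    rw [hpr]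
    rfl
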